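-- pv_equiv track=rewrite | github.com/lghuy05/myleetcode | contest3.py | minMoves
-- ===== SOURCE A (Python) =====
-- from typing import List
--
-- def minMoves(balance: List[int]) -> int:
--     if sum(balance) < 0:
--         return -1
--     n = len(balance)
--     neg = -1
--     need = 0
--     for i in range(n):
--         if balance[i] < 0:
--             neg = i
--             need = -balance[i]
--             break
--
--     li = balance[:]
--     li_2 = []
--     for i in range(n):
--         if i == neg:
--             continue
--         dist = min(abs(i - neg), n - abs(i - neg))
--         li_2.append((dist, balance[i], i))
--     li_2.sort()
--     result = 0
--     for dist, amt, indx in li_2: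
--         if need == 0:
--             break
--         take = min(amt, need)
--         result += take * dist
--         need -= take
--     return result
-- ===== SOURCE B (Python) =====
-- from typing import List
--
-- def minMoves(balance: List[int]) -> int:
--     if sum(balance) < 0:
--         return -1
--     # early-exit search for the first deficit
--     neg = -1
--     need = 0
--     for i, b in enumerate(balance):
--         if b < 0:
--             neg = i
--             need = -b
--             break
--     if neg == -1:
--         return 0
--     n = len(balance)
--     # No sort: the ring at circular distance d from neg holds at most the
--     # two positions (neg-d) % n and (neg+d) % n; walk d outward, ordering the
--     # (at most two) ring members by (balance, index) with one comparison.
--     result = 0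
--     for d in range(1, n // 2 + 1):
--         if need == 0:
--             break
--         p = (neg - d) % n
--         q = (neg + d) % n
--         if p == q:
--             ring = [(balance[p], p)]
--         elif (balance[p], p) < (balance[q], q):
--             ring = [(balance[p], p), (balance[q], q)]
--         else:
--             ring = [(balance[q], q), (balance[p], p)]
--         for amt, _ in ring:
--             if need == 0:
--                 break
--             take = min(amt, need)
--             result += take * d
--             need -= take
--     return result
-- ===== Notes on version B (the rewrite author's own statement) =====
-- stated objective: alternative
-- what changed: B eliminates A's sort of (dist,balance,index) triples entirely: each circular-distance ring holds at most the two positions (neg-d)%n and (neg+d)%n, so B walks d outward computing the two ring members arithmetically, ordering each pair with a single tuple comparison and stopping as soon as the deficit is covered, never materialising or sorting the triple list.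
import Mathlib
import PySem

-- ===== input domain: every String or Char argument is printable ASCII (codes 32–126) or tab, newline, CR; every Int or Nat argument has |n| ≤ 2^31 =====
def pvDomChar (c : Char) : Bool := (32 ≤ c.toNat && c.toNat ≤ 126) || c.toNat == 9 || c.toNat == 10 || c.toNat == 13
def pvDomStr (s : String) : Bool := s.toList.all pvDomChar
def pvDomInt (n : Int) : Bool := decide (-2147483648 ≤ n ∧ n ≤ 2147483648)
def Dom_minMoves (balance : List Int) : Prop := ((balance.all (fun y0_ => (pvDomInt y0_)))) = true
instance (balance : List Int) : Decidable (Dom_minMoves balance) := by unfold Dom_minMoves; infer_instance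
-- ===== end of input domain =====

-- B removes A's sort entirely: the ring at circular distance d holds at most the two
-- positions (neg-d)%n and (neg+d)%n, so B walks d outward, orders each ring with one
-- tuple comparison, and stops as soon as the deficit is covered.

-- ===== PORT A =====

-- the `for i in range(n): if balance[i] < 0: neg = i; need = -balance[i]; break` loop
def findNegA : List Int → Int → Int × Int
  | [], _ => (-1, 0)
  | b :: rest, i => if b < 0 then (i, -b) else findNegA rest (i + 1)

def distA (n neg i : Int) : Int := min |i - neg| (n - |i - neg|)

-- lexicographic key: Python compares int triples lexicographically, exactly the ×ₗ order
def lexKey3 (t : Int × Int × Int) : Int ×ₗ (Int ×ₗ Int) := toLex (t.1, toLex (t.2.1, t.2.2))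

-- the final `for dist, amt, indx in li_2` loop with its `if need == 0: break`; state (need, result)
def payA : List (Int × Int × Int) → Int × Int → Int × Int
  | [], s => s
  | (dist, amt, _) :: rest, (need, res) =>
      if need = 0 then (need, res)
      else payA rest (need - min amt need, res + min amt need * dist)

def minMoves (balance : List Int) : Int :=
  if balance.sum < 0 then -1
  else
    let n : Int := balance.length
    let nn := findNegA balance 0
    -- `li = balance[:]` is built by A but never used; nothing to port
    let li2 := (PySem.List.enumerate balance 0).foldl
      (fun acc p => if p.1 = nn.1 then acc
        else acc ++ [(distA n nn.1 p.1, p.2, p.1)]) []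
    -- li_2.sort() on int triples = stable sort by the lexicographic triple order (exact)
    (payA (PySem.List.sorted li2 lexKey3 false) (nn.2, 0)).2

-- ===== PORT B =====

-- the `for i, b in enumerate(balance): if b < 0: ... break` loop
def findNegB : List (Int × Int) → Int × Int
  | [] => (-1, 0)
  | (i, b) :: rest => if b < 0 then (i, -b) else findNegB rest

-- the ring at distance d: p = (neg-d) % n, q = (neg+d) % n, ordered by the tuple
-- comparison `(balance[p], p) < (balance[q], q)`; p, q lie in [0, n), so `.getD .toNat` is exact
def ringB (balance : List Int) (n neg d : Int) : List (Int × Int) :=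
  if PySem.Int.mod (neg - d) n = PySem.Int.mod (neg + d) n then
    [(balance.getD (PySem.Int.mod (neg - d) n).toNat 0, PySem.Int.mod (neg - d) n)]
  else if toLex (balance.getD (PySem.Int.mod (neg - d) n).toNat 0, PySem.Int.mod (neg - d) n)
      < toLex (balance.getD (PySem.Int.mod (neg + d) n).toNat 0, PySem.Int.mod (neg + d) n) then
    [(balance.getD (PySem.Int.mod (neg - d) n).toNat 0, PySem.Int.mod (neg - d) n),
     (balance.getD (PySem.Int.mod (neg + d) n).toNat 0, PySem.Int.mod (neg + d) n)]
  else
    [(balance.getD (PySem.Int.mod (neg + d) n).toNat 0, PySem.Int.mod (neg + d) n),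
     (balance.getD (PySem.Int.mod (neg - d) n).toNat 0, PySem.Int.mod (neg - d) n)]

-- inner `for amt, _ in ring` loop with its break; state (need, result)
def payB (d : Int) : List (Int × Int) → Int × Int → Int × Int
  | [], s => s
  | (amt, _) :: rest, (need, res) =>
      if need = 0 then (need, res)
      else payB d rest (need - min amt need, res + min amt need * d)

-- outer `for d in range(1, n//2 + 1)` loop with its break; state (need, result)
def outerB (balance : List Int) (n neg : Int) : List Int → Int × Int → Int × Int
  | [], s => s
  | d :: rest, (need, res) =>
      if need = 0 then (need, res)
      else outerB balance n neg rest (payB d (ringB balance n neg d) (need, res))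

def minMoves_alt (balance : List Int) : Int :=
  if balance.sum < 0 then -1
  else
    let nn := findNegB (PySem.List.enumerate balance 0)
    if nn.1 = -1 then 0
    else
      let n : Int := balance.length
      (outerB balance n nn.1 (PySem.List.pyRange 1 (PySem.Int.floordiv n 2 + 1) 1) (nn.2, 0)).2

-- ===== PRECONDITION & SPEC =====
def Spec_minMoves (balance : List Int) (out : Int) : Prop := out = minMoves_alt balance
instance (balance : List Int) (out : Int) : Decidable (Spec_minMoves balance out) := by unfold Spec_minMoves; infer_instance

-- ===== CLAIM (what is proved, stated in full; the proofs are below) =====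
def Claim_equal_minMoves : Prop := ∀ (balance : List Int), Dom_minMoves balance → Spec_minMoves balance (minMoves balance)

-- ===== LEMMAS AND PROOFS =====

def lexKey2 (p : Int × Int) : Int ×ₗ Int := toLex p

-- the ring of positions at circular distance d from neg, as (balance, index) pairs
def ringF (balance : List Int) (neg d : Int) : List (Int × Int) :=
  ((((PySem.List.enumerate balance 0).filter (fun p => decide ¬(p.1 = neg))).filter
     (fun p => decide (distA (balance.length : Int) neg p.1 = d))).map (fun p => (p.2, p.1)))

theorem payA_zero (xs : List (Int × Int × Int)) (res : Int) : payA xs (0, res) = (0, res) := by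
  cases xs with
  | nil => rfl
  | cons h t => obtain ⟨d, a, i⟩ := h; simp [payA]

theorem payA_append (xs ys : List (Int × Int × Int)) (s : Int × Int) :
    payA (xs ++ ys) s = payA ys (payA xs s) := by
  induction xs generalizing s with
  | nil => rfl
  | cons h t ih =>
    obtain ⟨d, a, i⟩ := h
    obtain ⟨need, res⟩ := s
    by_cases hz : need = 0
    · subst hz
      simp [payA, payA_zero]
    · simp [payA, hz, ih]

theorem payA_map (d : Int) (ring : List (Int × Int)) (s : Int × Int) :
    payA (ring.map (fun q => (d, q.1, q.2))) s = payB d ring s := by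
  induction ring generalizing s with
  | nil => rfl
  | cons h t ih =>
    obtain ⟨a, i⟩ := h
    obtain ⟨need, res⟩ := s
    by_cases hz : need = 0 <;> simp [payA, payB, hz, ih]

theorem findNegB_eq (l : List Int) (s0 : Int) :
    findNegB (PySem.List.enumerate l s0) = findNegA l s0 := by
  induction l generalizing s0 with
  | nil => rfl
  | cons b rest ih =>
    rw [PySem.List.enumerate_cons]
    by_cases hb : b < 0 <;> simp [findNegB, findNegA, hb, ih]

theorem findNegA_ran (l : List Int) (s0 : Int) :
    findNegA l s0 = (-1, 0) ∨ (s0 ≤ (findNegA l s0).1 ∧ (findNegA l s0).1 < s0 + l.length) := by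
  induction l generalizing s0 with
  | nil => left; rfl
  | cons b rest ih =>
    by_cases hb : b < 0
    · right
      simp only [findNegA, if_pos hb, List.length_cons]
      push_cast
      omega
    · simp only [findNegA, if_neg hb, List.length_cons]
      rcases ih (s0 + 1) with h | h
      · left; exact h
      · right; push_cast; omega

theorem partition_perm {α : Type} (L : List α) (k : α → Int) (ds : List Int)
    (hnd : ds.Nodup) (hcov : ∀ x ∈ L, k x ∈ ds) :
    (ds.flatMap fun d => L.filter (fun x => decide (k x = d))).Perm L := by
  induction ds generalizing L with
  | nil =>
    have : L = [] := List.eq_nil_iff_forall_not_mem.mpr (fun x hx => by simpa using hcov x hx)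
    simp [this]
  | cons d ds' ih =>
    rw [List.flatMap_cons]
    have hdnotin : d ∉ ds' := (List.nodup_cons.mp hnd).1
    have hstep : ∀ d' ∈ ds', L.filter (fun x => decide (k x = d'))
        = (L.filter (fun x => !decide (k x = d))).filter (fun x => decide (k x = d')) := by
      intro d' hd'
      rw [List.filter_filter]
      refine (List.filter_congr ?_).symm
      intro x _
      by_cases hx : k x = d'
      · have hne : ¬ d' = d := fun hc => hdnotin (hc ▸ hd')
        simp [hx, hne]
      · simp [hx]
    have htail : (ds'.flatMap fun d' => L.filter (fun x => decide (k x = d')))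
        = ds'.flatMap fun d' => (L.filter (fun x => !decide (k x = d))).filter
            (fun x => decide (k x = d')) := by
      simp only [List.flatMap_def]
      exact congrArg List.flatten (List.map_congr_left hstep)
    rw [htail]
    have hperm := ih (L.filter (fun x => !decide (k x = d))) (List.nodup_cons.mp hnd).2
      (by
        intro x hx
        have hx1 := List.of_mem_filter hx
        have hx2 := List.mem_of_mem_filter hx
        have := hcov x hx2
        simp at hx1
        simp only [List.mem_cons] at this
        tauto)
    exact (hperm.append_left _).trans (List.filter_append_perm _ L)

theorem dist_bounds (n neg i : Int) (h0 : 0 ≤ neg) (h1 : neg < n) (h2 : 0 ≤ i) (h3 : i < n)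
    (h4 : ¬ i = neg) : 1 ≤ distA n neg i ∧ 2 * distA n neg i ≤ n := by
  have ha1 : 1 ≤ |i - neg| := by rcases abs_cases (i - neg) with ⟨he, _⟩ | ⟨he, _⟩ <;> omega
  have ha2 : |i - neg| ≤ n - 1 := by rcases abs_cases (i - neg) with ⟨he, _⟩ | ⟨he, _⟩ <;> omega
  unfold distA
  rcases le_total (|i - neg|) (n - |i - neg|) with hm | hm
  · rw [min_eq_left hm]; omega
  · rw [min_eq_right hm]; omega

theorem half_bounds (n : Int) : 2 * PySem.Int.floordiv n 2 ≤ n ∧ n ≤ 2 * PySem.Int.floordiv n 2 + 1 := by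
  have h := PySem.Int.floordiv_mul_add_mod n 2
  have h1 := PySem.Int.mod_nonneg n (b := 2) (by norm_num)
  have h2 := PySem.Int.mod_lt n (b := 2) (by norm_num)
  omega

theorem li2_eq (balance : List Int) (neg : Int) :
    (PySem.List.enumerate balance 0).foldl
      (fun acc p => if p.1 = neg then acc
        else acc ++ [(distA (balance.length : Int) neg p.1, p.2, p.1)]) []
    = ((PySem.List.enumerate balance 0).filter (fun p => decide ¬(p.1 = neg))).map
        (fun p => (distA (balance.length : Int) neg p.1, p.2, p.1)) := by
  rw [PySem.List.foldl_congr_mem _ _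
    (fun acc p => if ¬(p.1 = neg) then acc ++ [(distA (balance.length : Int) neg p.1, p.2, p.1)] else acc) _
    (by intro acc x _; by_cases hx : x.1 = neg <;> simp [hx])]
  rw [PySem.List.foldl_append_ite (p := fun p : Int × Int => ¬(p.1 = neg))]
  simp

theorem pairwise_flatMap_of {α β : Type} (R : β → β → Prop) (l : List α) (f : α → List β)
    (h1 : ∀ a ∈ l, (f a).Pairwise R)
    (h2 : l.Pairwise (fun a b => ∀ x ∈ f a, ∀ y ∈ f b, R x y)) :
    (l.flatMap f).Pairwise R := by
  induction l with
  | nil => simp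
  | cons a t ih =>
    rw [List.flatMap_cons]
    rcases List.pairwise_cons.mp h2 with ⟨hhead, htail⟩
    refine List.pairwise_append.mpr ⟨h1 a (by simp), ih (fun b hb => h1 b (by simp [hb])) htail, ?_⟩
    intro x hx y hy
    rcases List.mem_flatMap.mp hy with ⟨b, hb, hyb⟩
    exact hhead b hb x hx y hyb

-- membership facts for the filtered enumeration
theorem memL_facts (balance : List Int) (neg : Int) (p : Int × Int)
    (hp : p ∈ (PySem.List.enumerate balance 0).filter (fun p => decide ¬(p.1 = neg))) :
    0 ≤ p.1 ∧ p.1 < (balance.length : Int) ∧ ¬ p.1 = neg := by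
  have h1 := List.of_mem_filter hp
  have h2 := List.mem_of_mem_filter hp
  rw [PySem.List.mem_enumerate_iff] at h2
  obtain ⟨k, hk, rfl⟩ := h2
  simp only [decide_eq_true_eq] at h1
  refine ⟨by simp, by simpa using hk, h1⟩

theorem sorted_decomp (balance : List Int) (neg : Int) (h0 : 0 ≤ neg)
    (h1 : neg < (balance.length : Int)) :
    PySem.List.sorted
      (((PySem.List.enumerate balance 0).filter (fun p => decide ¬(p.1 = neg))).map
        (fun p => (distA (balance.length : Int) neg p.1, p.2, p.1))) lexKey3 false
    = (PySem.List.pyRange 1 (PySem.Int.floordiv (balance.length : Int) 2 + 1) 1).flatMap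
        (fun d => (PySem.List.sorted (ringF balance neg d) lexKey2 false).map
          (fun q => (d, q.1, q.2))) := by
  have hn1 : (1:Int) ≤ (balance.length : Int) := by omega
  have hhalf := half_bounds (balance.length : Int)
  set n : Int := (balance.length : Int) with hn
  set L := (PySem.List.enumerate balance 0).filter (fun p => decide ¬(p.1 = neg)) with hL
  set fd := PySem.Int.floordiv n 2 with hfd
  set ds := PySem.List.pyRange 1 (fd + 1) 1 with hds
  have hdistL : ∀ p ∈ L, 1 ≤ distA n neg p.1 ∧ distA n neg p.1 ≤ fd := by
    intro p hp
    obtain ⟨hp0, hp1, hp2⟩ := memL_facts balance neg p hp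
    obtain ⟨hb1, hb2⟩ := dist_bounds n neg p.1 h0 h1 hp0 hp1 hp2
    exact ⟨hb1, by omega⟩
  -- each ring's elements sit at distance exactly d
  have hring_eq : ∀ d : Int, (ringF balance neg d).map (fun q => (d, q.1, q.2))
      = (L.filter (fun p => decide (distA n neg p.1 = d))).map
          (fun p => (distA n neg p.1, p.2, p.1)) := by
    intro d
    rw [ringF, ← hn, ← hL, List.map_map]
    refine List.map_congr_left ?_
    intro p hp
    have := List.of_mem_filter hp
    simp only [decide_eq_true_eq] at this
    simp [this]
  apply PySem.List.sorted_eq_of_perm_of_pairwise_lt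
  · -- permutation
    refine List.Perm.trans (List.Perm.flatMap_left ds (fun d _ =>
      List.Perm.map _ (PySem.List.sorted_perm (ringF balance neg d) lexKey2 false))) ?_
    have : (ds.flatMap fun d => (ringF balance neg d).map (fun q => (d, q.1, q.2)))
        = (ds.flatMap fun d => L.filter (fun p => decide (distA n neg p.1 = d))).map
            (fun p => (distA n neg p.1, p.2, p.1)) := by
      rw [List.map_flatMap]
      simp only [List.flatMap_def]
      exact congrArg List.flatten (List.map_congr_left (fun d _ => hring_eq d))
    rw [this]
    refine List.Perm.map _ (partition_perm L (fun p => distA n neg p.1) ds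
      (PySem.List.nodup_pyRange_one 1 (fd + 1)) ?_)
    intro p hp
    rw [hds, PySem.List.mem_pyRange_one]
    show (1:Int) ≤ distA n neg p.1 ∧ distA n neg p.1 < fd + 1
    have := hdistL p hp
    omega
  · -- strictly increasing lexicographic keys
    apply pairwise_flatMap_of
    · intro d _
      have hnd : (PySem.List.sorted (ringF balance neg d) lexKey2 false).Nodup := by
        refine List.Perm.nodup (PySem.List.sorted_perm (ringF balance neg d) lexKey2 false).symm ?_
        -- ringF has strictly increasing indices in the second component
        have hidx : (ringF balance neg d).Pairwise (fun q r => q.2 < r.2) := by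
          rw [ringF]
          refine List.Pairwise.map _ (fun a b h => h) ?_
          exact List.Pairwise.filter _ (List.Pairwise.filter _
            (PySem.List.pairwise_lt_enumerate balance 0))
        exact List.Pairwise.imp (fun h => by intro he; rw [he] at h; exact lt_irrefl _ h) hidx
      have hle := PySem.List.sorted_pairwise (ringF balance neg d) lexKey2
      have hcomb := List.Pairwise.and hle hnd
      have hstr : (PySem.List.sorted (ringF balance neg d) lexKey2 false).Pairwise
          (fun a b => lexKey2 a < lexKey2 b) := by
        refine List.Pairwise.imp ?_ hcomb
        rintro a b ⟨hab, hne⟩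
        exact lt_of_le_of_ne hab (fun hc => hne (toLex_inj.mp hc))
      refine List.Pairwise.map _ (fun a b h => ?_) hstr
      show lexKey3 (d, a.1, a.2) < lexKey3 (d, b.1, b.2)
      unfold lexKey3
      exact Prod.Lex.toLex_lt_toLex.mpr (Or.inr ⟨rfl, by simpa [lexKey2] using h⟩)
    · refine List.Pairwise.imp ?_ (PySem.List.pairwise_lt_pyRange_one 1 (fd + 1))
      intro d1 d2 hd x hx y hy
      rcases List.mem_map.mp hx with ⟨q, _, rfl⟩
      rcases List.mem_map.mp hy with ⟨r, _, rfl⟩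
      unfold lexKey3
      exact Prod.Lex.toLex_lt_toLex.mpr (Or.inl hd)

-- ===== new B-side lemmas: each ring is exactly the two arithmetic positions =====

theorem mod_lo (a N : Int) (hN : 0 < N) (h1 : -N ≤ a) (h2 : a < N) :
    PySem.Int.mod a N = if 0 ≤ a then a else a + N := by
  rw [PySem.Int.mod_eq_emod_of_pos hN]
  split_ifs with h
  · exact Int.emod_eq_of_lt h h2
  · have h3 := Int.add_mul_emod_self_left (a := a) (b := N) (c := 1)
    rw [mul_one] at h3
    rw [← h3]
    exact Int.emod_eq_of_lt (by omega) (by omega)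

theorem mod_hi (a N : Int) (hN : 0 < N) (h1 : 0 ≤ a) (h2 : a < 2 * N) :
    PySem.Int.mod a N = if a < N then a else a - N := by
  rw [PySem.Int.mod_eq_emod_of_pos hN]
  split_ifs with h
  · exact Int.emod_eq_of_lt h1 h
  · have h3 := Int.add_mul_emod_self_left (a := a - N) (b := N) (c := 1)
    rw [mul_one, sub_add_cancel] at h3
    rw [h3]
    exact Int.emod_eq_of_lt (by omega) (by omega)

theorem ring_mem_iff (N neg d i : Int) (h0 : 0 ≤ neg) (h1 : neg < N)
    (hd1 : 1 ≤ d) (hd2 : 2 * d ≤ N) (hi0 : 0 ≤ i) (hi1 : i < N) :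
    distA N neg i = d ↔ (i = PySem.Int.mod (neg - d) N ∨ i = PySem.Int.mod (neg + d) N) := by
  have hN : 0 < N := by omega
  rw [mod_lo (neg - d) N hN (by omega) (by omega), mod_hi (neg + d) N hN (by omega) (by omega)]
  unfold distA
  rcases abs_cases (i - neg) with ⟨he, hge⟩ | ⟨he, hlt⟩ <;> rw [he] <;> split_ifs <;> omega

theorem pq_facts (N neg d : Int) (h0 : 0 ≤ neg) (h1 : neg < N) (hd1 : 1 ≤ d) (hd2 : 2 * d ≤ N) :
    (0 ≤ PySem.Int.mod (neg - d) N ∧ PySem.Int.mod (neg - d) N < N ∧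
      ¬ PySem.Int.mod (neg - d) N = neg) ∧
    (0 ≤ PySem.Int.mod (neg + d) N ∧ PySem.Int.mod (neg + d) N < N ∧
      ¬ PySem.Int.mod (neg + d) N = neg) := by
  have hN : 0 < N := by omega
  rw [mod_lo (neg - d) N hN (by omega) (by omega), mod_hi (neg + d) N hN (by omega) (by omega)]
  split_ifs <;> refine ⟨⟨by omega, by omega, by omega⟩, ⟨by omega, by omega, by omega⟩⟩

theorem mem_ringF_iff (balance : List Int) (neg d : Int) (x : Int × Int) :
    x ∈ ringF balance neg d ↔ ∃ (k : Nat) (h : k < balance.length),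
      x = (balance[k], (k : Int)) ∧ ¬ (k : Int) = neg ∧
        distA (balance.length : Int) neg (k : Int) = d := by
  unfold ringF
  simp only [List.mem_map, List.mem_filter, PySem.List.mem_enumerate_iff, decide_eq_true_eq]
  constructor
  · rintro ⟨p, ⟨⟨⟨k, hk, rfl⟩, hne⟩, hdist⟩, rfl⟩
    exact ⟨k, hk, by simp, by simpa using hne, by simpa using hdist⟩
  · rintro ⟨k, hk, rfl, hne, hdist⟩
    exact ⟨((k : Int), balance[k]), ⟨⟨⟨k, hk, by simp⟩, hne⟩, hdist⟩, rfl⟩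

theorem getD_toNat_eq (balance : List Int) (i : Int) (h0 : 0 ≤ i)
    (h1 : i < (balance.length : Int)) :
    balance.getD i.toNat 0 = balance[i.toNat]'(by omega) := by
  exact List.getD_eq_getElem balance 0 (by omega)

-- the sorted ring, for two abstract candidate positions P and Q
theorem sorted_pair (balance : List Int) (neg d P Q : Int)
    (hP0 : 0 ≤ P) (hP1 : P < (balance.length : Int)) (hPne : ¬ P = neg)
    (hQ0 : 0 ≤ Q) (hQ1 : Q < (balance.length : Int)) (hQne : ¬ Q = neg)
    (hchar : ∀ k : Nat, k < balance.length → ¬ (k : Int) = neg →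
      (distA (balance.length : Int) neg (k : Int) = d ↔ (k : Int) = P ∨ (k : Int) = Q)) :
    PySem.List.sorted (ringF balance neg d) lexKey2 false =
      (if P = Q then [(balance.getD P.toNat 0, P)]
       else if toLex (balance.getD P.toNat 0, P) < toLex (balance.getD Q.toNat 0, Q) then
         [(balance.getD P.toNat 0, P), (balance.getD Q.toNat 0, Q)]
       else
         [(balance.getD Q.toNat 0, Q), (balance.getD P.toNat 0, P)]) := by
  have hbP := getD_toNat_eq balance P hP0 hP1
  have hbQ := getD_toNat_eq balance Q hQ0 hQ1
  have hmem : ∀ x, x ∈ ringF balance neg d ↔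
      (x = (balance.getD P.toNat 0, P) ∨ x = (balance.getD Q.toNat 0, Q)) := by
    intro x
    rw [mem_ringF_iff]
    constructor
    · rintro ⟨k, hk, rfl, hne, hdist⟩
      rcases (hchar k hk hne).mp hdist with hcase | hcase
      · left
        subst hcase
        rw [hbP]
        simp
      · right
        subst hcase
        rw [hbQ]
        simp
    · rintro (rfl | rfl)
      · refine ⟨P.toNat, by omega, ?_, ?_, ?_⟩
        · rw [hbP]
          simp [Int.toNat_of_nonneg hP0]
        · rw [Int.toNat_of_nonneg hP0]; exact hPne
        · exact (hchar P.toNat (by omega)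
            (by rw [Int.toNat_of_nonneg hP0]; exact hPne)).mpr
            (by rw [Int.toNat_of_nonneg hP0]; exact Or.inl rfl)
      · refine ⟨Q.toNat, by omega, ?_, ?_, ?_⟩
        · rw [hbQ]
          simp [Int.toNat_of_nonneg hQ0]
        · rw [Int.toNat_of_nonneg hQ0]; exact hQne
        · exact (hchar Q.toNat (by omega)
            (by rw [Int.toNat_of_nonneg hQ0]; exact hQne)).mpr
            (by rw [Int.toNat_of_nonneg hQ0]; exact Or.inr rfl)
  -- ringF is nodup (strictly increasing indices)
  have hidx : (ringF balance neg d).Pairwise (fun a b => a.2 < b.2) := by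
    rw [ringF]
    refine List.Pairwise.map _ (fun a b h => h) ?_
    exact List.Pairwise.filter _ (List.Pairwise.filter _
      (PySem.List.pairwise_lt_enumerate balance 0))
  have hndF : (ringF balance neg d).Nodup :=
    List.Pairwise.imp (fun h => by intro he; rw [he] at h; exact lt_irrefl _ h) hidx
  by_cases hPQ : P = Q
  · subst hPQ
    rw [if_pos rfl]
    apply PySem.List.sorted_eq_of_perm_of_pairwise_lt
    · refine (List.perm_ext_iff_of_nodup (by simp) hndF).mpr ?_
      intro x
      rw [hmem x, or_self, List.mem_singleton]
    · simp
  · rw [if_neg hPQ]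
    have hnePQ : ((balance.getD P.toNat 0, P) : Int × Int) ≠ (balance.getD Q.toNat 0, Q) :=
      fun hc => hPQ (congrArg Prod.snd hc)
    by_cases hlt : toLex ((balance.getD P.toNat 0 : Int), P)
        < toLex ((balance.getD Q.toNat 0 : Int), Q)
    · rw [if_pos hlt]
      apply PySem.List.sorted_eq_of_perm_of_pairwise_lt
      · refine (List.perm_ext_iff_of_nodup ?_ hndF).mpr ?_
        · refine List.pairwise_cons.mpr ⟨?_, List.pairwise_singleton _ _⟩
          intro y hy
          rw [List.mem_singleton] at hy
          subst hy
          exact hnePQ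
        · intro x
          rw [hmem x]
          simp
      · refine List.pairwise_cons.mpr ⟨?_, List.pairwise_singleton _ _⟩
        intro y hy
        rw [List.mem_singleton] at hy
        subst hy
        exact hlt
    · rw [if_neg hlt]
      apply PySem.List.sorted_eq_of_perm_of_pairwise_lt
      · refine (List.perm_ext_iff_of_nodup ?_ hndF).mpr ?_
        · refine List.pairwise_cons.mpr ⟨?_, List.pairwise_singleton _ _⟩
          intro y hy
          rw [List.mem_singleton] at hy
          subst hy
          exact hnePQ.symm
        · intro x
          rw [hmem x]
          simp
          tauto
      · refine List.pairwise_cons.mpr ⟨?_, List.pairwise_singleton _ _⟩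
        intro y hy
        rw [List.mem_singleton] at hy
        subst hy
        refine lt_of_le_of_ne (not_lt.mp hlt) ?_
        intro hc
        exact hnePQ (toLex_inj.mp hc.symm)

theorem sorted_ringF (balance : List Int) (neg d : Int) (h0 : 0 ≤ neg)
    (h1 : neg < (balance.length : Int)) (hd1 : 1 ≤ d) (hd2 : 2 * d ≤ (balance.length : Int)) :
    PySem.List.sorted (ringF balance neg d) lexKey2 false
      = ringB balance (balance.length : Int) neg d := by
  obtain ⟨⟨hp0, hp1, hpne⟩, ⟨hq0, hq1, hqne⟩⟩ :=
    pq_facts (balance.length : Int) neg d h0 h1 hd1 hd2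
  unfold ringB
  exact sorted_pair balance neg d _ _ hp0 hp1 hpne hq0 hq1 hqne
    (fun k hk hkne => ring_mem_iff (balance.length : Int) neg d (k : Int)
      h0 h1 hd1 hd2 (by simp) (by omega))

theorem outer_main (balance : List Int) (neg : Int) (ds : List Int) (s : Int × Int)
    (hB : ∀ d ∈ ds, PySem.List.sorted (ringF balance neg d) lexKey2 false
        = ringB balance (balance.length : Int) neg d) :
    payA (ds.flatMap (fun d => (PySem.List.sorted (ringF balance neg d) lexKey2 false).map
        (fun q => (d, q.1, q.2)))) s
    = outerB balance (balance.length : Int) neg ds s := by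
  induction ds generalizing s with
  | nil => rfl
  | cons d rest ih =>
    obtain ⟨need, res⟩ := s
    by_cases hz : need = 0
    · subst hz
      simp [payA_zero, outerB]
    · rw [List.flatMap_cons, payA_append, payA_map]
      simp only [outerB, if_neg hz]
      rw [hB d List.mem_cons_self]
      exact ih _ (fun d' hd' => hB d' (List.mem_cons_of_mem d hd'))

-- ===== VERDICT (by name: the statement is the Claim_ definition above) =====
theorem minMoves_spec : Claim_equal_minMoves := by
  intro balance _
  unfold Spec_minMoves minMoves minMoves_alt
  rw [findNegB_eq]
  by_cases hsum : balance.sum < 0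
  · simp [hsum]
  · simp only [if_neg hsum]
    rcases findNegA_ran balance 0 with hcase | ⟨hge, hlt⟩
    · rw [hcase]
      simp [payA_zero]
    · have hne : ¬ (findNegA balance 0).1 = -1 := by omega
      simp only [hne, if_false]
      have hhalf := half_bounds (balance.length : Int)
      rw [li2_eq, sorted_decomp balance (findNegA balance 0).1 (by omega) (by omega)]
      rw [outer_main balance (findNegA balance 0).1 _ _
        (fun d hd => sorted_ringF balance (findNegA balance 0).1 d (by omega) (by omega)
          (PySem.List.mem_pyRange_one.mp hd).1
          (by have := (PySem.List.mem_pyRange_one.mp hd).2; omega))]
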